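-- pv_equiv track=rewrite | github.com/joamdlim/addu-admissions-chatbot | backend/test_fixes.py | is_likely_fabricated_url
-- ===== SOURCE A (Python) =====
-- def is_likely_fabricated_url(url):
--     """Check if a URL looks fabricated/hallucinated"""
--     fabrication_indicators = [
--         'example.com',
--         'placeholder',
--         'your-domain',
--         'university.edu',
--         'school.edu',
--         'addu.edu.ph/fake',
--         'addu.edu.ph/example',
--         'curriculum-link',
--         'program-info',
--         'addu.edu.ph/programs',  # Common fabrication pattern
--         'addu.edu.ph/curriculum',  # Common fabrication pattern
--         'addu.edu.ph/information-technology',  # Specific fabrication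
--         'addu.edu.ph/bs-it'  # Specific fabrication
--     ]
--
--     url_lower = url.lower()
--     return any(indicator in url_lower for indicator in fabrication_indicators)
-- ===== SOURCE B (Python) =====
-- FABRICATION_INDICATORS = [
--     'example.com',
--     'placeholder',
--     'your-domain',
--     'university.edu',
--     'school.edu',
--     'addu.edu.ph/fake',
--     'addu.edu.ph/example',
--     'curriculum-link',
--     'program-info',
--     'addu.edu.ph/programs',
--     'addu.edu.ph/curriculum',
--     'addu.edu.ph/information-technology',
--     'addu.edu.ph/bs-it',
-- ]
--
--
-- def is_likely_fabricated_url(url):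
--     """Check if a URL looks fabricated/hallucinated.
--
--     Single left-to-right scan over the lowercased URL: at each position,
--     test whether any indicator starts there (position-major), instead of
--     running one full substring search per indicator (indicator-major).
--     """
--     s = url.lower()
--     for i in range(len(s) + 1):
--         for ind in FABRICATION_INDICATORS:
--             if s.startswith(ind, i):
--                 return True
--     return False
-- ===== Notes on version B (the rewrite author's own statement) =====
-- stated objective: alternative
-- what changed: A runs one independent full substring search per indicator (any(ind in s)); B makes a single position-major left-to-right scan of the lowercased URL, testing at each position whether any indicator starts there, with early exit on the first hit.
import Mathlib
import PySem

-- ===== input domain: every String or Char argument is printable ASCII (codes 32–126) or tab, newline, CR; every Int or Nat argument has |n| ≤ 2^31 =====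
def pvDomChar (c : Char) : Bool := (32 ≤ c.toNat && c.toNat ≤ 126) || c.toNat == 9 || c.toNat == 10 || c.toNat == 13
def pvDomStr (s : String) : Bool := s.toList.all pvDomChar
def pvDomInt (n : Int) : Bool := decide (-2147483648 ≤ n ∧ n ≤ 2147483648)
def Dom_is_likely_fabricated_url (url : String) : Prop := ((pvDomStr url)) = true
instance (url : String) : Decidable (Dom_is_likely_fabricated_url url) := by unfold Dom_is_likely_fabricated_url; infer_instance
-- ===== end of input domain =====

-- B replaces A's one-full-substring-search-per-indicator with a single position-major
-- scan of the lowercased URL (alternative decomposition, same asymptotic cost).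

-- ===== PORT A =====
-- the fabrication_indicators list (identical literal in A and B)
def fabricationIndicators : List String :=
  ["example.com", "placeholder", "your-domain", "university.edu", "school.edu",
   "addu.edu.ph/fake", "addu.edu.ph/example", "curriculum-link", "program-info",
   "addu.edu.ph/programs", "addu.edu.ph/curriculum",
   "addu.edu.ph/information-technology", "addu.edu.ph/bs-it"]

def is_likely_fabricated_url (url : String) : Bool :=
  let url_lower := PySem.Str.lower url
  fabricationIndicators.any (fun indicator => PySem.Str.isIn indicator url_lower)

-- ===== PORT B =====
-- B's indicator list, as char lists (Source B's module-level constant)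
def fabIndicatorsChars : List (List Char) := fabricationIndicators.map String.toList

-- the position-major scan: 'for i in range(len(s)+1): for ind in …: if s.startswith(ind, i)';
-- s.startswith(ind, i) is startswith on the i-th suffix, so recurse over suffixes
def fabScan : List Char → Bool
  | [] => fabIndicatorsChars.any (fun ind => PySem.Chars.startswith [] ind)
  | c :: rest =>
      fabIndicatorsChars.any (fun ind => PySem.Chars.startswith (c :: rest) ind) || fabScan rest

def is_likely_fabricated_url_alt (url : String) : Bool :=
  fabScan (PySem.Chars.lower url.toList)

-- ===== PRECONDITION & SPEC =====
def Spec_is_likely_fabricated_url (url : String) (out : Bool) : Prop := out = is_likely_fabricated_url_alt url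
instance (url : String) (out : Bool) : Decidable (Spec_is_likely_fabricated_url url out) := by unfold Spec_is_likely_fabricated_url; infer_instance

-- ===== CLAIM (what is proved, stated in full; the proofs are below) =====
def Claim_equal_is_likely_fabricated_url : Prop := ∀ (url : String), Dom_is_likely_fabricated_url url → Spec_is_likely_fabricated_url url (is_likely_fabricated_url url)

-- ===== LEMMAS AND PROOFS =====

-- the position-major scan decides exactly 'some indicator is an infix'
theorem fabScan_eq_any_isIn (s : List Char) :
    fabScan s = fabIndicatorsChars.any (fun ind => PySem.Chars.isIn ind s) := by
  induction s with
  | nil =>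
      rw [fabScan, Bool.eq_iff_iff]
      simp only [List.any_eq_true, PySem.Chars.startswith_iff, PySem.Chars.isIn_iff_infix,
        List.prefix_nil, List.infix_nil]
  | cons c rest ih =>
      rw [fabScan, ih, Bool.eq_iff_iff]
      simp only [Bool.or_eq_true, List.any_eq_true, PySem.Chars.startswith_iff,
        PySem.Chars.isIn_iff_infix, List.infix_cons_iff]
      constructor
      · rintro (⟨i, hi, h⟩ | ⟨i, hi, h⟩)
        · exact ⟨i, hi, Or.inl h⟩
        · exact ⟨i, hi, Or.inr h⟩
      · rintro ⟨i, hi, h | h⟩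
        · exact Or.inl ⟨i, hi, h⟩
        · exact Or.inr ⟨i, hi, h⟩

-- ===== VERDICT (by name: the statement is the Claim_ definition above) =====
theorem is_likely_fabricated_url_spec : Claim_equal_is_likely_fabricated_url := by
  intro url _
  unfold Spec_is_likely_fabricated_url is_likely_fabricated_url is_likely_fabricated_url_alt
  rw [fabScan_eq_any_isIn]
  unfold fabIndicatorsChars
  rw [List.any_map]
  simp [Function.comp_def, PySem.Str.isIn, PySem.Str.lower]
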